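-- pv_equiv track=rewrite | github.com/ali1hammoud/GeneticAlgorithm-GraphColoringProblem | GA.py | fittest
-- ===== SOURCE A (Python) =====
-- def fittest(solution_list):
--     fittest_value_list = []
--     for fittest_solution in solution_list:
--         my_dict = {i:fittest_solution.count(i) for i in fittest_solution}
--         fittest_value = len(my_dict)
--         fittest_value_list.append(fittest_value)
--     fittest_list = list(zip(fittest_value_list,solution_list))
--     sorted_fittest_list = sorted(fittest_list, key=lambda k:k[0])
--     solution=list(filter(lambda x: x[0] == sorted_fittest_list[0][0], sorted_fittest_list))
--     number_colors_solution = solution[0][0]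
--     solution=[x[1] for x in solution]
--     return number_colors_solution, solution
-- ===== SOURCE B (Python) =====
-- def fittest(solution_list):
--     # one pass tracking the running minimum distinct-color count (no sort, no per-element count dict)
--     best = len(set(solution_list[0]))
--     solution = [solution_list[0]]
--     for s in solution_list[1:]:
--         c = len(set(s))
--         if c < best:
--             best = c
--             solution = [s]
--         elif c == best:
--             solution.append(s)
--     return best, solution
-- ===== Notes on version B (the rewrite author's own statement) =====
-- stated objective: faster
-- what changed: A counts distinct colors per solution via a quadratic count-dict, zips, stably sorts all pairs by count and filters the minimum; B makes a single pass with len(set(s)) tracking the running minimum count and its list of solutions.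
import Mathlib
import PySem

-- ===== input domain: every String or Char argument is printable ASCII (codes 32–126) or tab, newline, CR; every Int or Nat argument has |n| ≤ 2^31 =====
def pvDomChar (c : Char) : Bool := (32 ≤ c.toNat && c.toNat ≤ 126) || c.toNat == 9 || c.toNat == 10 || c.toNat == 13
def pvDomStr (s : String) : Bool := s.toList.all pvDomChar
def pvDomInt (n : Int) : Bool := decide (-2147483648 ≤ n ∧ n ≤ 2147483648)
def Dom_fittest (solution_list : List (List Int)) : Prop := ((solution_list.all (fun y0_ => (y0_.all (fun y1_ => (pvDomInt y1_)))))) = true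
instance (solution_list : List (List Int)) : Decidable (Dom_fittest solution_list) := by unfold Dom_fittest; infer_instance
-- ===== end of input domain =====

-- B replaces A's count-dicts + stable sort + filter by a single running-minimum pass using len(set(s)).


-- ===== PORT A =====
def fittest (solution_list : List (List Int)) : Int × List (List Int) :=
  let fittest_value_list : List Int := solution_list.foldl (fun acc fittest_solution =>
    let my_dict : PySem.Dict Int Int := fittest_solution.foldl
      (fun d i => d.insert i ((PySem.List.count fittest_solution i : Int))) PySem.Dict.empty
    acc ++ [(my_dict.size : Int)]) []
  let fittest_list := fittest_value_list.zip solution_list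
  let sorted_fittest_list := PySem.List.sorted fittest_list (fun k => k.1)
  match PySem.List.pyGet? sorted_fittest_list 0 with
  | none => (0, [])   -- sorted_fittest_list[0] raises IndexError (empty input); excluded by Pre_
  | some h =>
    let solution := sorted_fittest_list.filter (fun x => x.1 == h.1)
    match PySem.List.pyGet? solution 0 with
    | none => (0, [])   -- unreachable: solution contains h
    | some p => (p.1, solution.map (fun x => x.2))

-- ===== PORT B =====
def fittest_alt (solution_list : List (List Int)) : Int × List (List Int) :=
  match solution_list with
  | [] => (0, [])   -- solution_list[0] raises IndexError; excluded by Pre_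
  | s0 :: rest =>   -- best = len(set(solution_list[0])); solution = [solution_list[0]]; loop over solution_list[1:]
    rest.foldl (fun acc s =>
      let c := PySem.Set.len (PySem.Set.ofList s)
      if c < acc.1 then (c, [s])
      else if c == acc.1 then (acc.1, acc.2 ++ [s])
      else acc)
      (PySem.Set.len (PySem.Set.ofList s0), [s0])

-- ===== PRECONDITION & SPEC =====
-- Both A and B raise IndexError on the empty list; Pre_ excludes exactly that input.
def Pre_fittest (solution_list : List (List Int)) : Prop := solution_list ≠ []
instance (solution_list : List (List Int)) : Decidable (Pre_fittest solution_list) := by unfold Pre_fittest; infer_instance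
def pvWitness_fittest : List (List Int) := [[1, 2, 1], [3], [2, 2]]
def Spec_fittest (solution_list : List (List Int)) (out : Int × List (List Int)) : Prop := out = fittest_alt solution_list
instance (solution_list : List (List Int)) (out : Int × List (List Int)) : Decidable (Spec_fittest solution_list out) := by unfold Spec_fittest; infer_instance

-- ===== CLAIM (what is proved, stated in full; the proofs are below) =====
def Claim_equal_fittest : Prop := ∀ (solution_list : List (List Int)), Dom_fittest solution_list → Pre_fittest solution_list → Spec_fittest solution_list (fittest solution_list)

-- ===== LEMMAS AND PROOFS =====

-- the distinct-element count of a solution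
def pvCnt (s : List Int) : Int := PySem.Set.len (PySem.Set.ofList s)

-- the running minimum of pvCnt over l, started at b
def pvMin (l : List (List Int)) (b : Int) : Int := l.foldl (fun a s => min a (pvCnt s)) b

lemma pvMin_nil (b : Int) : pvMin [] b = b := rfl

lemma pvMin_cons (s : List Int) (l : List (List Int)) (b : Int) :
    pvMin (s :: l) b = pvMin l (min b (pvCnt s)) := rfl

lemma pvMin_le (l : List (List Int)) (b : Int) :
    pvMin l b ≤ b ∧ ∀ s ∈ l, pvMin l b ≤ pvCnt s := by
  induction l generalizing b with
  | nil => simp [pvMin_nil]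
  | cons s t ih =>
    rcases ih (min b (pvCnt s)) with ⟨h1, h2⟩
    refine ⟨?_, ?_⟩
    · simpa [pvMin_cons] using le_trans h1 (min_le_left _ _)
    · intro u hu
      rcases List.mem_cons.mp hu with rfl | hu
      · simpa [pvMin_cons] using le_trans h1 (min_le_right _ _)
      · simpa [pvMin_cons] using h2 u hu

lemma pvMin_attained (l : List (List Int)) (b : Int) :
    pvMin l b = b ∨ ∃ s ∈ l, pvMin l b = pvCnt s := by
  induction l generalizing b with
  | nil => left; rfl
  | cons s t ih =>
    rcases ih (min b (pvCnt s)) with h | ⟨u, hu, h⟩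
    · rcases le_total b (pvCnt s) with hle | hle
      · left; rw [pvMin_cons, h]; omega
      · right; exact ⟨s, List.mem_cons_self, by rw [pvMin_cons, h]; omega⟩
    · right; exact ⟨u, List.mem_cons_of_mem _ hu, by rw [pvMin_cons]; exact h⟩

lemma pvMin_eq_iff_all (l : List (List Int)) (b : Int) :
    pvMin l b = b ↔ ∀ s ∈ l, b ≤ pvCnt s := by
  constructor
  · intro h s hs
    have := (pvMin_le l b).2 s hs
    omega
  · intro h
    rcases pvMin_attained l b with h' | ⟨u, hu, h'⟩
    · exact h'
    · have h1 := (pvMin_le l b).1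
      have h2 := h u hu
      omega

-- characterisation of B's fold
lemma foldB_eq (l : List (List Int)) (b : Int) (sel : List (List Int)) :
    l.foldl (fun acc s =>
      let c := PySem.Set.len (PySem.Set.ofList s)
      if c < acc.1 then (c, [s])
      else if c == acc.1 then (acc.1, acc.2 ++ [s])
      else acc) (b, sel)
    = (pvMin l b,
       (if ∀ s ∈ l, b ≤ pvCnt s then sel else []) ++ l.filter (fun s => pvCnt s == pvMin l b)) := by
  induction l generalizing b sel with
  | nil => simp [pvMin_nil]
  | cons s t ih =>
    simp only [List.foldl_cons]
    by_cases h1 : pvCnt s < b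
    · rw [show (if PySem.Set.len (PySem.Set.ofList s) < (b, sel).1 then (PySem.Set.len (PySem.Set.ofList s), [s])
            else if PySem.Set.len (PySem.Set.ofList s) == (b, sel).1 then ((b, sel).1, (b, sel).2 ++ [s]) else (b, sel))
          = (pvCnt s, [s]) by rw [if_pos (show PySem.Set.len (PySem.Set.ofList s) < (b, sel).1 from h1)]; rfl]
      rw [ih]
      have hm : pvMin (s :: t) b = pvMin t (pvCnt s) := by
        rw [pvMin_cons, show min b (pvCnt s) = pvCnt s by omega]
      rw [hm]
      have hnot : ¬ ∀ u ∈ s :: t, b ≤ pvCnt u := by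
        intro h; have := h s List.mem_cons_self; omega
      rw [if_neg hnot, List.nil_append, List.filter_cons]
      by_cases h2 : ∀ u ∈ t, pvCnt s ≤ pvCnt u
      · have heq : pvMin t (pvCnt s) = pvCnt s := (pvMin_eq_iff_all t (pvCnt s)).mpr h2
        rw [if_pos h2, heq, if_pos (by simp only [beq_iff_eq])]
        simp
      · have hlt : pvMin t (pvCnt s) < pvCnt s := by
          have h4 := (pvMin_le t (pvCnt s)).1
          have : pvMin t (pvCnt s) ≠ pvCnt s := fun he => h2 ((pvMin_eq_iff_all t (pvCnt s)).mp he)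
          omega
        rw [if_neg h2, List.nil_append, if_neg (by simp only [beq_iff_eq]; omega)]
    · by_cases h2 : pvCnt s = b
      · rw [show (if PySem.Set.len (PySem.Set.ofList s) < (b, sel).1 then (PySem.Set.len (PySem.Set.ofList s), [s])
              else if PySem.Set.len (PySem.Set.ofList s) == (b, sel).1 then ((b, sel).1, (b, sel).2 ++ [s]) else (b, sel))
            = (b, sel ++ [s]) by
              rw [if_neg (show ¬(PySem.Set.len (PySem.Set.ofList s) < (b, sel).1) from h1),
                if_pos (show (PySem.Set.len (PySem.Set.ofList s) == (b, sel).1) = true from beq_iff_eq.mpr h2)]]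
        rw [ih]
        have hm : pvMin (s :: t) b = pvMin t b := by
          rw [pvMin_cons, show min b (pvCnt s) = b by omega]
        rw [hm, List.filter_cons]
        by_cases h3 : ∀ u ∈ t, b ≤ pvCnt u
        · have hall : ∀ u ∈ s :: t, b ≤ pvCnt u := by
            intro u hu; rcases List.mem_cons.mp hu with rfl | hu
            · omega
            · exact h3 u hu
          have heq : pvMin t b = b := (pvMin_eq_iff_all t b).mpr h3
          rw [if_pos h3, if_pos hall, heq, if_pos (by simp only [beq_iff_eq]; omega)]
          simp
        · have hnot : ¬ ∀ u ∈ s :: t, b ≤ pvCnt u := by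
            intro h; exact h3 (fun u hu => h u (List.mem_cons_of_mem _ hu))
          have hlt : pvMin t b < b := by
            have h4 := (pvMin_le t b).1
            have : pvMin t b ≠ b := fun he => h3 ((pvMin_eq_iff_all t b).mp he)
            omega
          rw [if_neg h3, if_neg hnot, if_neg (by simp only [beq_iff_eq]; omega)]
      · rw [show (if PySem.Set.len (PySem.Set.ofList s) < (b, sel).1 then (PySem.Set.len (PySem.Set.ofList s), [s])
              else if PySem.Set.len (PySem.Set.ofList s) == (b, sel).1 then ((b, sel).1, (b, sel).2 ++ [s]) else (b, sel))
            = (b, sel) by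
              rw [if_neg (show ¬(PySem.Set.len (PySem.Set.ofList s) < (b, sel).1) from h1),
                if_neg (show ¬((PySem.Set.len (PySem.Set.ofList s) == (b, sel).1) = true) from by
                  simp only [beq_iff_eq]; exact h2)]]
        rw [ih]
        have hbc : b < pvCnt s := by omega
        have hm : pvMin (s :: t) b = pvMin t b := by
          rw [pvMin_cons, show min b (pvCnt s) = b by omega]
        rw [hm, List.filter_cons]
        have hlt : pvMin t b < pvCnt s := by
          have := (pvMin_le t b).1; omega
        by_cases h3 : ∀ u ∈ t, b ≤ pvCnt u
        · have hall : ∀ u ∈ s :: t, b ≤ pvCnt u := by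
            intro u hu; rcases List.mem_cons.mp hu with rfl | hu
            · omega
            · exact h3 u hu
          rw [if_pos h3, if_pos hall, if_neg (by simp only [beq_iff_eq]; omega)]
        · have hnot : ¬ ∀ u ∈ s :: t, b ≤ pvCnt u := by
            intro h; exact h3 (fun u hu => h u (List.mem_cons_of_mem _ hu))
          rw [if_neg h3, if_neg hnot, if_neg (by simp only [beq_iff_eq]; omega)]

-- B's result on a nonempty list
lemma fittest_alt_eq (s0 : List Int) (rest : List (List Int)) :
    fittest_alt (s0 :: rest)
      = (pvMin rest (pvCnt s0), (s0 :: rest).filter (fun s => pvCnt s == pvMin rest (pvCnt s0))) := by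
  have h0 := foldB_eq rest (pvCnt s0) [s0]
  show rest.foldl _ (pvCnt s0, [s0]) = _
  rw [h0, List.filter_cons]
  by_cases h : ∀ s ∈ rest, pvCnt s0 ≤ pvCnt s
  · have heq := (pvMin_eq_iff_all rest (pvCnt s0)).mpr h
    rw [if_pos h, if_pos (by simp only [beq_iff_eq]; omega)]
    simp
  · have hlt : pvMin rest (pvCnt s0) < pvCnt s0 := by
      have h4 := (pvMin_le rest (pvCnt s0)).1
      have : pvMin rest (pvCnt s0) ≠ pvCnt s0 := fun he => h ((pvMin_eq_iff_all rest (pvCnt s0)).mp he)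
      omega
    rw [if_neg h, if_neg (by simp only [beq_iff_eq]; omega)]
    simp

-- A's per-solution count equals pvCnt
lemma dict_size_eq_cnt (s : List Int) :
    ((s.foldl (fun d i => d.insert i ((PySem.List.count s i : Int))) PySem.Dict.empty).size : Int) = pvCnt s := by
  have hk := PySem.Dict.keys_foldl_insert s (fun d i => ((PySem.List.count s i : Int))) PySem.Dict.empty
  have hsz : (s.foldl (fun d i => d.insert i ((PySem.List.count s i : Int))) PySem.Dict.empty).size
      = (s.foldl (fun d i => d.insert i ((PySem.List.count s i : Int))) PySem.Dict.empty).keys.length := by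
    simp [PySem.Dict.size, PySem.Dict.keys]
  rw [pvCnt, hsz, hk]
  rfl

-- the accumulating loop over solution_list is a map
lemma foldl_append_map {α β : Type} (f : α → β) (l : List α) (acc : List β) :
    l.foldl (fun a x => a ++ [f x]) acc = acc ++ l.map f := by
  induction l generalizing acc with
  | nil => simp
  | cons x t ih => simp [ih]

lemma zip_map_left {α β : Type} (f : α → β) (l : List α) :
    (l.map f).zip l = l.map (fun x => (f x, x)) := by
  induction l with
  | nil => rfl
  | cons x t ih => simp [ih]

-- STABILITY: filtering a minimal key out of the stable sort gives the original order
lemma filter_insertBy_of_ne (x : Int × List Int) (ys : List (Int × List Int)) (m : Int)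
    (hx : x.1 ≠ m) :
    (PySem.List.insertBy (fun a b => decide (a.1 < b.1)) x ys).filter (fun p => p.1 == m)
      = ys.filter (fun p => p.1 == m) := by
  induction ys with
  | nil => simp [PySem.List.insertBy, hx]
  | cons y t ih =>
    show (if decide (x.1 < y.1) = true then x :: y :: t else y :: PySem.List.insertBy _ x t).filter _ = _
    split_ifs with h
    · simp [List.filter_cons, hx]
    · simp only [List.filter_cons]
      rw [ih]

lemma filter_insertBy_of_min (x : Int × List Int) (ys : List (Int × List Int)) (m : Int)
    (hx : x.1 = m) (hsorted : ys.Pairwise (fun a b => a.1 ≤ b.1)) (hmin : ∀ p ∈ ys, m ≤ p.1) :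
    (PySem.List.insertBy (fun a b => decide (a.1 < b.1)) x ys).filter (fun p => p.1 == m)
      = ys.filter (fun p => p.1 == m) ++ [x] := by
  induction ys with
  | nil => simp [PySem.List.insertBy, hx]
  | cons y t ih =>
    show (if decide (x.1 < y.1) = true then x :: y :: t else y :: PySem.List.insertBy _ x t).filter _ = _
    split_ifs with h
    · -- m < y.1, so no element of y :: t has key m
      have hy : m < y.1 := by rw [← hx]; simpa using h
      have hnone : ∀ p ∈ y :: t, p.1 ≠ m := by
        intro p hp
        rcases List.mem_cons.mp hp with rfl | hp
        · omega
        · have h1 := (List.pairwise_cons.mp hsorted).1 p hp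
          omega
      have hfe : (y :: t).filter (fun p => p.1 == m) = [] := by
        rw [List.filter_eq_nil_iff]
        intro p hp; simpa using hnone p hp
      simp [hx, hfe]
    · have hy : ¬ x.1 < y.1 := by simpa using h
      have hym : y.1 = m := by
        have := hmin y List.mem_cons_self
        omega
      simp only [List.filter_cons]
      rw [ih (List.pairwise_cons.mp hsorted).2 (fun p hp => hmin p (List.mem_cons_of_mem _ hp))]
      simp [hym]

lemma filter_sorted_min (l : List (Int × List Int)) (m : Int) (hmin : ∀ p ∈ l, m ≤ p.1) :
    (PySem.List.sorted l (fun p => p.1)).filter (fun p => p.1 == m)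
      = l.filter (fun p => p.1 == m) := by
  induction l using List.reverseRecOn with
  | nil => rfl
  | append_singleton t x ih =>
    have hs : PySem.List.sorted (t ++ [x]) (fun p => p.1)
        = PySem.List.insertBy (fun a b => decide (a.1 < b.1)) x (PySem.List.sorted t (fun p => p.1)) := by
      rw [PySem.List.sorted_eq_foldl_insertBy, PySem.List.sorted_eq_foldl_insertBy, List.foldl_append]
      rfl
    have hmt : ∀ p ∈ t, m ≤ p.1 := fun p hp => hmin p (List.mem_append_left _ hp)
    have hmx : m ≤ x.1 := hmin x (List.mem_append_right _ List.mem_cons_self)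
    rw [hs]
    by_cases hx : x.1 = m
    · rw [filter_insertBy_of_min x _ m hx (PySem.List.sorted_pairwise t (fun p => p.1))
        (fun p hp => hmt p ((PySem.List.mem_sorted t (fun p => p.1) false p).mp hp))]
      rw [ih hmt, List.filter_append, List.filter_cons]
      simp [hx]
    · rw [filter_insertBy_of_ne x _ m hx, ih hmt, List.filter_append, List.filter_cons]
      simp [hx]

lemma pyGet?_cons_zero {α : Type} (x : α) (t : List α) : PySem.List.pyGet? (x :: t) 0 = some x := by
  simp [PySem.List.pyGet?, PySem.List.pyIdx?]

-- A's result on a nonempty list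
lemma fittest_eq (s0 : List Int) (rest : List (List Int)) :
    fittest (s0 :: rest)
      = (pvMin rest (pvCnt s0), (s0 :: rest).filter (fun s => pvCnt s == pvMin rest (pvCnt s0))) := by
  set sl := s0 :: rest with hsl
  set m := pvMin rest (pvCnt s0) with hm
  -- the counts list is a map
  have hfvl : sl.foldl (fun acc fittest_solution =>
      let my_dict : PySem.Dict Int Int := fittest_solution.foldl
        (fun d i => d.insert i ((PySem.List.count fittest_solution i : Int))) PySem.Dict.empty
      acc ++ [(my_dict.size : Int)]) [] = sl.map pvCnt := by
    have := foldl_append_map (fun s : List Int =>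
      ((s.foldl (fun d i => d.insert i ((PySem.List.count s i : Int))) PySem.Dict.empty).size : Int)) sl []
    simp only [List.nil_append] at this
    rw [show (fun acc (fittest_solution : List Int) =>
        let my_dict : PySem.Dict Int Int := fittest_solution.foldl
          (fun d i => d.insert i ((PySem.List.count fittest_solution i : Int))) PySem.Dict.empty
        acc ++ [(my_dict.size : Int)]) = (fun a x => a ++ [(((x.foldl (fun d i => d.insert i ((PySem.List.count x i : Int))) PySem.Dict.empty).size : Int))]) from rfl]
    rw [this]
    exact List.map_congr_left (fun s _ => dict_size_eq_cnt s)
  -- m bounds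
  have hlb : ∀ s ∈ sl, m ≤ pvCnt s := by
    intro s hs
    rcases List.mem_cons.mp hs with rfl | hs
    · exact (pvMin_le rest (pvCnt s)).1
    · exact (pvMin_le rest (pvCnt s0)).2 s hs
  have hattain : ∃ s ∈ sl, pvCnt s = m := by
    rcases pvMin_attained rest (pvCnt s0) with h | ⟨u, hu, h⟩
    · exact ⟨s0, List.mem_cons_self, h.symm⟩
    · exact ⟨u, List.mem_cons_of_mem _ hu, h.symm⟩
  -- unfold A
  show (let fittest_value_list : List Int := sl.foldl _ []
        let fittest_list := fittest_value_list.zip sl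
        let sorted_fittest_list := PySem.List.sorted fittest_list (fun k => k.1)
        match PySem.List.pyGet? sorted_fittest_list 0 with
        | none => ((0 : Int), ([] : List (List Int)))
        | some h =>
          let solution := sorted_fittest_list.filter (fun x : Int × List Int => x.1 == h.1)
          match PySem.List.pyGet? solution 0 with
          | none => (0, [])
          | some p => (p.1, solution.map (fun x : Int × List Int => x.2))) = _
  simp only [hfvl, zip_map_left]
  set fl := sl.map (fun s => (pvCnt s, s)) with hfl
  have hflmin : ∀ p ∈ fl, m ≤ p.1 := by
    intro p hp
    rcases List.mem_map.mp hp with ⟨s, hs, rfl⟩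
    exact hlb s hs
  have hflne : fl ≠ [] := by simp [hfl, hsl]
  obtain ⟨h0, tl, hsort⟩ : ∃ h0 tl, PySem.List.sorted fl (fun k => k.1) = h0 :: tl := by
    rcases hne : PySem.List.sorted fl (fun k => k.1) with _ | ⟨h0, tl⟩
    · exact absurd ((PySem.List.sorted_eq_nil_iff fl (fun k => k.1) false).mp hne) hflne
    · exact ⟨h0, tl, rfl⟩
  have hh0 : h0.1 = m := by
    have hmem : h0 ∈ fl := (PySem.List.mem_sorted fl (fun k => k.1) false h0).mp (hsort ▸ List.mem_cons_self)
    rcases List.mem_map.mp hmem with ⟨s, hs, rfl⟩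
    rcases hattain with ⟨u, hu, humin⟩
    have hle := PySem.List.key_head_sorted_le fl (fun k => k.1) hsort (pvCnt u, u) (List.mem_map.mpr ⟨u, hu, rfl⟩)
    have := hlb s hs
    simp at hle ⊢
    omega
  rw [hsort, pyGet?_cons_zero]
  -- reduce the filtered sorted list via stability
  have hfilter : (h0 :: tl).filter (fun x => x.1 == h0.1) = fl.filter (fun p => p.1 == m) := by
    rw [← hsort, hh0]
    exact filter_sorted_min fl m hflmin
  have hfl2 : fl.filter (fun p => p.1 == m) = (sl.filter (fun s => pvCnt s == m)).map (fun s => (pvCnt s, s)) := by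
    rw [hfl, List.filter_map]
    rfl
  obtain ⟨q, qt, hq⟩ : ∃ q qt, (sl.filter (fun s => pvCnt s == m)) = q :: qt := by
    rcases hattain with ⟨u, hu, humin⟩
    rcases hne : sl.filter (fun s => pvCnt s == m) with _ | ⟨q, qt⟩
    · exfalso
      have := List.filter_eq_nil_iff.mp hne u hu
      simp [humin] at this
    · exact ⟨q, qt, rfl⟩
  have hq1 : pvCnt q = m := by
    have hqm : q ∈ sl.filter (fun s => pvCnt s == m) := hq ▸ List.mem_cons_self
    have := List.of_mem_filter hqm
    simpa using this
  show (match PySem.List.pyGet? ((h0 :: tl).filter (fun x : Int × List Int => x.1 == h0.1)) 0 with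
        | none => ((0 : Int), ([] : List (List Int)))
        | some p => (p.1, ((h0 :: tl).filter (fun x : Int × List Int => x.1 == h0.1)).map (fun x : Int × List Int => x.2))) = _
  rw [hfilter, hfl2, hq]
  simp only [List.map_cons, pyGet?_cons_zero]
  show ((pvCnt q, q).1, ((pvCnt q, q) :: qt.map (fun s => (pvCnt s, s))).map (fun x : Int × List Int => x.2)) = _
  rw [show ((pvCnt q, q) :: qt.map (fun s => (pvCnt s, s))) = ((q :: qt).map (fun s => (pvCnt s, s))) from rfl]
  rw [← hq]
  simp only [List.map_map]
  rw [hq1]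
  rw [show ((fun x : Int × List Int => x.2) ∘ fun s : List Int => (pvCnt s, s)) = fun s => s from rfl, List.map_id_fun']
  rfl

-- ===== VERDICT (by name: the statement is the Claim_ definition above) =====
theorem fittest_spec : Claim_equal_fittest := by
  intro solution_list _ hpre
  unfold Spec_fittest
  match solution_list, hpre with
  | s0 :: rest, _ =>
    rw [fittest_eq, fittest_alt_eq]
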